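-- pv_equiv track=rewrite | github.com/DagmawitG/competitive-programming | 1387-sort-integers-by-the-power-value/1387-sort-integers-by-the-power-value.py | getKth
-- ===== SOURCE A (Python) =====
-- def getKth(lo: int, hi: int, k: int) -> int:
--     cache = {1:1}
--
--     def recursion(n):
--         if n in cache:
--             return cache[n]
--         else:
--             if n % 2 == 0:
--                 cache[n] = 1 + recursion(n//2)
--             else:
--                 cache[n] = 1 + recursion(3*n+1)
--
--             return cache[n]
--     ans = []
--     for i in range(lo,hi+1):
--         ans.append(i)
--         # recursion(i)
--
--     ans.sort(key=lambda x:recursion(x))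
--     return ans[k-1]
-- ===== SOURCE B (Python) =====
-- def getKth(lo: int, hi: int, k: int) -> int:
--     def power(n):
--         steps = 0
--         while n != 1:
--             n = n // 2 if n % 2 == 0 else 3 * n + 1
--             steps += 1
--         return steps + 1
--
--     ans = list(range(lo, hi + 1))
--     ans.sort(key=power)
--     return ans[k - 1]
-- ===== Notes on version B (the rewrite author's own statement) =====
-- stated objective: simpler
-- what changed: The memoized recursive power computation with a shared cache dict is replaced by a plain iterative step-counting loop per element; the range list is built directly and sorted by that iterative key.
import Mathlib
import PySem

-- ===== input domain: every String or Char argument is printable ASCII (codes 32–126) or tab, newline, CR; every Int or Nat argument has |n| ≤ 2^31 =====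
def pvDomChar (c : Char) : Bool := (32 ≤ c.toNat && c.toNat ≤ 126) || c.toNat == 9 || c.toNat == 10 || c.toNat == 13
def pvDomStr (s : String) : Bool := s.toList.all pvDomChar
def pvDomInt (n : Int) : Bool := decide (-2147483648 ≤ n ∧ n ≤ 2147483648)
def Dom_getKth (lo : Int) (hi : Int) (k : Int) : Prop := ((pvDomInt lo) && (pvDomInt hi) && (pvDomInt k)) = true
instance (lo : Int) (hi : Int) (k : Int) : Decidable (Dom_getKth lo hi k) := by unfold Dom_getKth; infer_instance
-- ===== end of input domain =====

-- B replaces A's memoized recursive Collatz power with a plain iterative step-counting loop (simpler; no speed claim).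
-- Both ports use a fuel parameter (an artifact of porting the unbounded Python recursion/loop); pvFuel is far above any
-- Collatz trajectory length reachable in the domain, and the proof does not depend on fuel sufficing.

def pvFuel : Nat := 100000

-- ===== PORT A =====
-- recursion(n) with the cache dict threaded through; a cache hit consumes fuel equal to the stored trajectory length,
-- so fuel exhaustion (never reached by a terminating Python run) is independent of the cache.
def pvRecA : Nat → PySem.Dict Int Int → Int → Option Int × PySem.Dict Int Int
  | fuel, c, n =>
    match c.get? n with
    | some v => (if v - 1 ≤ (fuel : Int) then some v else none, c)
    | none =>
      match fuel with
      | 0 => (none, c)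
      | f + 1 =>
        if PySem.Int.mod n 2 == 0 then
          match pvRecA f c (PySem.Int.floordiv n 2) with
          | (some v, c1) => (some (1 + v), c1.insert n (1 + v))
          | (none, c1) => (none, c1)
        else
          match pvRecA f c (3 * n + 1) with
          | (some v, c1) => (some (1 + v), c1.insert n (1 + v))
          | (none, c1) => (none, c1)

def getKth (lo : Int) (hi : Int) (k : Int) : Int :=
  -- cache = {1: 1}
  let ans : List Int := PySem.List.pyRange lo (hi + 1) 1
  let sortedAns := PySem.List.sorted ans (fun x => ((pvRecA pvFuel (PySem.Dict.ofList [(1, 1)]) x).1).getD 0)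
  PySem.List.pyGetD sortedAns (k - 1) 0

-- ===== PORT B =====
-- power(n): steps = 0; while n != 1: step; return steps + 1  (fuel-bounded loop, none on exhaustion)
def pvLoopB : Nat → Int → Int → Option Int
  | fuel, n, steps =>
    if n = 1 then some (steps + 1)
    else
      match fuel with
      | 0 => none
      | f + 1 => pvLoopB f (if PySem.Int.mod n 2 == 0 then PySem.Int.floordiv n 2 else 3 * n + 1) (steps + 1)

def getKth_alt (lo : Int) (hi : Int) (k : Int) : Int :=
  let ans : List Int := PySem.List.pyRange lo (hi + 1) 1
  let sortedAns := PySem.List.sorted ans (fun x => (pvLoopB pvFuel x 0).getD 0)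
  PySem.List.pyGetD sortedAns (k - 1) 0

-- ===== PRECONDITION & SPEC =====
-- Pre_ excludes inputs on which the Python A does not return normally: lo ≤ 0 with a nonempty range makes the
-- Collatz recursion diverge or exceed the recursion limit, and an out-of-range index k-1 (in particular any k
-- when lo > hi) raises IndexError.
def Pre_getKth (lo : Int) (hi : Int) (k : Int) : Prop :=
  1 ≤ lo ∧ PySem.Raise.InRange (hi + 1 - lo).toNat (k - 1)
instance (lo : Int) (hi : Int) (k : Int) : Decidable (Pre_getKth lo hi k) := by unfold Pre_getKth; infer_instance

def pvWitness_getKth : Int × Int × Int := (12, 15, 2)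

def Spec_getKth (lo : Int) (hi : Int) (k : Int) (out : Int) : Prop := out = getKth_alt lo hi k
instance (lo : Int) (hi : Int) (k : Int) (out : Int) : Decidable (Spec_getKth lo hi k out) := by unfold Spec_getKth; infer_instance

-- ===== CLAIM (what is proved, stated in full; the proofs are below) =====
def Claim_equal_getKth : Prop := ∀ (lo : Int) (hi : Int) (k : Int), Dom_getKth lo hi k → Pre_getKth lo hi k → Spec_getKth lo hi k (getKth lo hi k)

-- ===== LEMMAS AND PROOFS =====

-- reference fuel-bounded Collatz power (cacheless): some (trajectory length + 1), none if fuel runs out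
def pvP : Nat → Int → Option Int
  | f, n =>
    if n = 1 then some 1
    else
      match f with
      | 0 => none
      | f + 1 => (pvP f (if PySem.Int.mod n 2 == 0 then PySem.Int.floordiv n 2 else 3 * n + 1)).map (1 + ·)

lemma pvP_one (f : Nat) : pvP f 1 = some 1 := by
  cases f <;> rw [pvP] <;> simp

lemma pvP_zero_ne (n : Int) (hn : n ≠ 1) : pvP 0 n = none := by
  rw [pvP, if_neg hn]

lemma pvP_succ (f : Nat) (n : Int) (hn : n ≠ 1) :
    pvP (f + 1) n = (pvP f (if PySem.Int.mod n 2 == 0 then PySem.Int.floordiv n 2 else 3 * n + 1)).map (1 + ·) := by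
  rw [pvP, if_neg hn]

lemma pvP_min {f : Nat} {n v : Int} (h : pvP f n = some v) :
    1 ≤ v ∧ (v - 1).toNat ≤ f ∧ pvP (v - 1).toNat n = some v := by
  induction f generalizing n v with
  | zero =>
    by_cases hn : n = 1
    · subst hn; rw [pvP_one] at h
      simp only [Option.some_inj] at h; subst h
      exact ⟨le_refl 1, by omega, pvP_one _⟩
    · rw [pvP_zero_ne n hn] at h; simp at h
  | succ f ih =>
    by_cases hn : n = 1
    · subst hn; rw [pvP_one] at h
      simp only [Option.some_inj] at h; subst h
      exact ⟨le_refl 1, by omega, pvP_one _⟩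
    · rw [pvP_succ f n hn] at h
      simp only [Option.map_eq_some_iff] at h
      obtain ⟨u, hu, hv⟩ := h
      obtain ⟨h1, h2, h3⟩ := ih hu
      subst hv
      refine ⟨by omega, by omega, ?_⟩
      have ht : (1 + u - 1).toNat = (u - 1).toNat + 1 := by omega
      rw [ht, pvP_succ _ _ hn, h3]
      simp

lemma pvP_mono {f f' : Nat} {n v : Int} (hle : f ≤ f') (h : pvP f n = some v) :
    pvP f' n = some v := by
  induction f generalizing n v f' with
  | zero =>
    by_cases hn : n = 1
    · subst hn; rw [pvP_one] at h ⊢; exact h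
    · rw [pvP_zero_ne n hn] at h; simp at h
  | succ f ih =>
    by_cases hn : n = 1
    · subst hn; rw [pvP_one] at h ⊢; exact h
    · rw [pvP_succ f n hn] at h
      simp only [Option.map_eq_some_iff] at h
      obtain ⟨u, hu, hv⟩ := h
      obtain ⟨f'', hf''⟩ : ∃ f'', f' = f'' + 1 := ⟨f' - 1, by omega⟩
      subst hf''
      rw [pvP_succ f'' n hn, ih (by omega) hu]
      simp [hv]

lemma pvP_unique {f f' : Nat} {n v w : Int} (h : pvP f n = some v) (h' : pvP f' n = some w) : v = w := by
  have h1 := pvP_mono (Nat.le_max_left f f') h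
  have h2 := pvP_mono (Nat.le_max_right f f') h'
  rw [h1] at h2; exact Option.some_inj.mp h2

-- the cache invariant: 1 ↦ 1 is present and every entry stores the true power with minimal fuel
def pvInv (c : PySem.Dict Int Int) : Prop :=
  c.get? 1 = some 1 ∧ ∀ n v : Int, c.get? n = some v → pvP (v - 1).toNat n = some v

-- a cache hit under the invariant returns exactly what pvP returns at the current fuel
lemma pvHit_eq {c : PySem.Dict Int Int} {n v : Int} (hc : pvInv c) (hget : c.get? n = some v)
    (fuel : Nat) : (if v - 1 ≤ (fuel : Int) then some v else none) = pvP fuel n := by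
  have hv := hc.2 n v hget
  have hmin := pvP_min hv
  split
  · rename_i hle
    exact (pvP_mono (by omega) hmin.2.2).symm
  · rename_i hle
    cases hP : pvP fuel n with
    | none => rfl
    | some w =>
      have hw := pvP_unique hP hv
      subst hw
      have := (pvP_min hP).2.1
      omega

lemma pvRecA_eq {f : Nat} {c : PySem.Dict Int Int} (n : Int) (hc : pvInv c) :
    (pvRecA f c n).1 = pvP f n ∧ pvInv (pvRecA f c n).2 := by
  induction f generalizing c n with
  | zero =>
    rw [pvRecA]
    cases hget : c.get? n with
    | some v => exact ⟨pvHit_eq hc hget 0, hc⟩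
    | none =>
      have hn1 : n ≠ 1 := by intro h; subst h; rw [hc.1] at hget; simp at hget
      exact ⟨(pvP_zero_ne n hn1).symm, hc⟩
  | succ f ih =>
    rw [pvRecA]
    cases hget : c.get? n with
    | some v => exact ⟨pvHit_eq hc hget (f + 1), hc⟩
    | none =>
      have hn1 : n ≠ 1 := by intro h; subst h; rw [hc.1] at hget; simp at hget
      by_cases hpar : PySem.Int.mod n 2 == 0
      · simp only [hpar, if_true]
        obtain ⟨ihv, ihinv⟩ := ih (PySem.Int.floordiv n 2) hc
        cases hrec : pvRecA f c (PySem.Int.floordiv n 2) with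
        | mk r c1 =>
          rw [hrec] at ihv ihinv
          simp only at ihv ihinv
          cases r with
          | none =>
            refine ⟨?_, ihinv⟩
            rw [pvP_succ f n hn1, if_pos hpar, ← ihv]
            rfl
          | some u =>
            have hmin := pvP_min ihv.symm
            refine ⟨?_, ?_, ?_⟩
            · rw [pvP_succ f n hn1, if_pos hpar, ← ihv]
              rfl
            · rw [PySem.Dict.get?_insert]
              split
              · rename_i h1; exact absurd h1.symm hn1
              · exact ihinv.1
            · intro m w hm
              rw [PySem.Dict.get?_insert] at hm
              split at hm
              · rename_i hmn
                simp only [Option.some_inj] at hm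
                subst hm
                rw [hmn]
                have ht : (1 + u - 1).toNat = (u - 1).toNat + 1 := by
                  have := hmin.1; omega
                rw [ht, pvP_succ _ _ hn1, if_pos hpar, hmin.2.2]
                simp
              · exact ihinv.2 m w hm
      · simp only [hpar, Bool.false_eq_true, if_false]
        obtain ⟨ihv, ihinv⟩ := ih (3 * n + 1) hc
        cases hrec : pvRecA f c (3 * n + 1) with
        | mk r c1 =>
          rw [hrec] at ihv ihinv
          simp only at ihv ihinv
          cases r with
          | none =>
            refine ⟨?_, ihinv⟩
            rw [pvP_succ f n hn1, if_neg hpar, ← ihv]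
            rfl
          | some u =>
            have hmin := pvP_min ihv.symm
            refine ⟨?_, ?_, ?_⟩
            · rw [pvP_succ f n hn1, if_neg hpar, ← ihv]
              rfl
            · rw [PySem.Dict.get?_insert]
              split
              · rename_i h1; exact absurd h1.symm hn1
              · exact ihinv.1
            · intro m w hm
              rw [PySem.Dict.get?_insert] at hm
              split at hm
              · rename_i hmn
                simp only [Option.some_inj] at hm
                subst hm
                rw [hmn]
                have ht : (1 + u - 1).toNat = (u - 1).toNat + 1 := by
                  have := hmin.1; omega
                rw [ht, pvP_succ _ _ hn1, if_neg hpar, hmin.2.2]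
                simp
              · exact ihinv.2 m w hm

lemma pvInv_init : pvInv (PySem.Dict.ofList [(1, 1)]) := by
  constructor
  · decide
  · intro n v h
    have he : PySem.Dict.ofList [((1:Int), (1:Int))] = PySem.Dict.mk [(1, 1)] := by decide
    rw [he, PySem.Dict.get?_mk_cons] at h
    split at h
    · rename_i hb
      have hn : n = 1 := by simpa using (beq_iff_eq.mp hb).symm
      have hv : v = 1 := by simpa using h.symm
      subst hn; subst hv
      simpa using pvP_one 0
    · simp [PySem.Dict.get?] at h

lemma pvLoopB_eq (f : Nat) (n s : Int) : pvLoopB f n s = (pvP f n).map (fun v => v + s) := by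
  induction f generalizing n s with
  | zero =>
    rw [pvLoopB]
    by_cases hn : n = 1
    · subst hn; rw [pvP_one]; simp; omega
    · rw [if_neg hn, pvP_zero_ne n hn]; simp
  | succ f ih =>
    rw [pvLoopB]
    by_cases hn : n = 1
    · subst hn; rw [pvP_one]; simp; omega
    · rw [if_neg hn, pvP_succ f n hn, ih]
      cases pvP f (if PySem.Int.mod n 2 == 0 then PySem.Int.floordiv n 2 else 3 * n + 1) with
      | none => simp
      | some u => simp; omega

lemma pvKey_eq : (fun x => ((pvRecA pvFuel (PySem.Dict.ofList [(1, 1)]) x).1).getD 0)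
    = (fun x : Int => (pvLoopB pvFuel x 0).getD 0) := by
  funext x
  rw [(pvRecA_eq x pvInv_init).1, pvLoopB_eq]
  cases pvP pvFuel x <;> simp

-- ===== VERDICT (by name: the statement is the Claim_ definition above) =====
theorem getKth_spec : Claim_equal_getKth := by
  intro lo hi k _ _
  unfold Spec_getKth getKth getKth_alt
  rw [pvKey_eq]
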